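-- pv_equiv track=rewrite | github.com/M4THYOU/jbsV0.001 | firesdk/util/utils.py | needs_to_open_hours
-- ===== SOURCE A (Python) =====
-- def first_not_zero_index(int_list):
--     first_not_zero = None
--
--     for item in int_list:
--         if item != 0:
--             first_not_zero = int_list.index(item)
--             break
--
--     return first_not_zero
--
-- def last_not_zero_index(int_list):
--     last_not_zero = None
--
--     for item in int_list[::-1]:
--         if item != 0:
--             last_not_zero = len(int_list) - 1 - int_list[::-1].index(item)
--             break
--
--     return last_not_zero
--
-- def needs_to_open_hours(needs_dict):
--     open_hours_dict = {
--         'sunday': {},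
--         'monday': {},
--         'tuesday': {},
--         'wednesday': {},
--         'thursday': {},
--         'friday': {},
--         'saturday': {},
--     }
--
--     for day, hour_list in needs_dict['needs'].items():
--         first_hour = first_not_zero_index(hour_list)
--         last_hour = last_not_zero_index(hour_list)
--
--         open_hours_dict[day]['first'] = first_hour
--         open_hours_dict[day]['last'] = last_hour
--
--     return open_hours_dict
-- ===== SOURCE B (Python) =====
-- DAYS = ['sunday', 'monday', 'tuesday', 'wednesday', 'thursday', 'friday', 'saturday']
--
-- def needs_to_open_hours(needs_dict):
--     open_hours_dict = {day: {} for day in DAYS}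
--     for day, hour_list in needs_dict['needs'].items():
--         nonzero = [i for i, v in enumerate(hour_list) if v != 0]
--         open_hours_dict[day]['first'] = nonzero[0] if nonzero else None
--         open_hours_dict[day]['last'] = nonzero[-1] if nonzero else None
--     return open_hours_dict
-- ===== Notes on version B (the rewrite author's own statement) =====
-- stated objective: simpler
-- what changed: Replaces the two helper functions (a forward scan calling list.index and a scan over a reversed copy calling index on a second reversed copy) with a single forward pass per hour list that collects the nonzero indices and reads its two endpoints.
import Mathlib
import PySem

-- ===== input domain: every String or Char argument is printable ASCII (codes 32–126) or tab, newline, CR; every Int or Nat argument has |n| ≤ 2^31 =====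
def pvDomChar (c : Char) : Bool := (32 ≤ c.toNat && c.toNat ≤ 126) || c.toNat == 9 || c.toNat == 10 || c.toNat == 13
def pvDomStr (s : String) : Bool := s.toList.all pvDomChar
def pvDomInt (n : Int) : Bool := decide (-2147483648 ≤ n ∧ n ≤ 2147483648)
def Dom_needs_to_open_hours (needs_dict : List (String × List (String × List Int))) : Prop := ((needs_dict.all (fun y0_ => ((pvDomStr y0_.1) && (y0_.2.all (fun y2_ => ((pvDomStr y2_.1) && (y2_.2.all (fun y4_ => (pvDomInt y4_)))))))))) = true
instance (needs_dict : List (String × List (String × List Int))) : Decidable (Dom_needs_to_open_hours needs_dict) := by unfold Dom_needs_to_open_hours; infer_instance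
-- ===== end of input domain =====

-- B replaces A's two helper scans (one using list.index, one over reversed copies) by a single
-- forward pass per hour list collecting nonzero indices and reading its endpoints (objective: simpler).

-- ===== PORT A =====
-- for item in int_list: if item != 0: first = int_list.index(item); break
def firstGo (int_list : List Int) : List Int → Option Int
  | [] => none
  | x :: xs =>
    if x ≠ 0 then (PySem.List.index? int_list x).map (fun k => (k : Int))
    else firstGo int_list xs

def first_not_zero_index (int_list : List Int) : Option Int :=
  firstGo int_list int_list

-- for item in int_list[::-1]: if item != 0: last = len(int_list) - 1 - int_list[::-1].index(item); break
def lastGo (int_list : List Int) : List Int → Option Int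
  | [] => none
  | x :: xs =>
    if x ≠ 0 then
      (PySem.List.index? ((PySem.List.slice? int_list none none (-1)).getD []) x).map
        (fun k => (int_list.length : Int) - 1 - (k : Int))
    else lastGo int_list xs

def last_not_zero_index (int_list : List Int) : Option Int :=
  lastGo int_list ((PySem.List.slice? int_list none none (-1)).getD [])

def needs_to_open_hours (needs_dict : List (String × List (String × List Int))) : List (String × List (String × Option Int)) :=
  let open0 : PySem.Dict String (PySem.Dict String (Option Int)) :=
    ((((((PySem.Dict.empty.insert "sunday" PySem.Dict.empty).insert "monday" PySem.Dict.empty).insert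
        "tuesday" PySem.Dict.empty).insert "wednesday" PySem.Dict.empty).insert
        "thursday" PySem.Dict.empty).insert "friday" PySem.Dict.empty).insert "saturday" PySem.Dict.empty
  -- needs_dict['needs'] (KeyError if missing: excluded by Pre_)
  let needs : PySem.Dict String (List Int) :=
    PySem.Dict.ofList (((PySem.Dict.ofList needs_dict).get? "needs").getD [])
  let final := needs.items.foldl (fun d p =>
      let first_hour := first_not_zero_index p.2
      let last_hour := last_not_zero_index p.2
      match d.get? p.1 with
      | some inner => d.insert p.1 ((inner.insert "first" first_hour).insert "last" last_hour)
      | none => d  -- Python raises KeyError on an unknown day: excluded by Pre_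
    ) open0
  final.items.map (fun p => (p.1, p.2.items))

-- ===== PORT B =====
def pvDays : List String := ["sunday", "monday", "tuesday", "wednesday", "thursday", "friday", "saturday"]

-- nonzero = [i for i, v in enumerate(hour_list) if v != 0]
def nonzero_indices (hour_list : List Int) : List Int :=
  ((PySem.List.enumerate hour_list 0).filter (fun p => p.2 != 0)).map (·.1)

def needs_to_open_hours_alt (needs_dict : List (String × List (String × List Int))) : List (String × List (String × Option Int)) :=
  let open0 : PySem.Dict String (PySem.Dict String (Option Int)) :=
    pvDays.foldl (fun d day => d.insert day PySem.Dict.empty) PySem.Dict.empty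
  let needs : PySem.Dict String (List Int) :=
    PySem.Dict.ofList (((PySem.Dict.ofList needs_dict).get? "needs").getD [])
  let final := needs.items.foldl (fun d p =>
      let nz := nonzero_indices p.2
      match d.get? p.1 with
      | some inner => d.insert p.1 ((inner.insert "first" nz.head?).insert "last" nz.getLast?)
      | none => d
    ) open0
  final.items.map (fun p => (p.1, p.2.items))

-- ===== PRECONDITION & SPEC =====
-- Pre_ excludes exactly the inputs where Python A raises KeyError: a missing 'needs' key, or a
-- day name in the needs dict that is not one of the seven pre-seeded days.
def Pre_needs_to_open_hours (needs_dict : List (String × List (String × List Int))) : Prop :=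
  ((PySem.Dict.ofList needs_dict).get? "needs").isSome = true ∧
  ∀ p ∈ ((PySem.Dict.ofList needs_dict).get? "needs").getD [], p.1 ∈ pvDays

instance (needs_dict : List (String × List (String × List Int))) : Decidable (Pre_needs_to_open_hours needs_dict) := by unfold Pre_needs_to_open_hours; infer_instance

def pvWitness_needs_to_open_hours : (List (String × List (String × List Int))) :=
  [("needs", [("monday", [0, 2, 0, 3]), ("friday", [0, 0])])]

def Spec_needs_to_open_hours (needs_dict : List (String × List (String × List Int))) (out : List (String × List (String × Option Int))) : Prop := out = needs_to_open_hours_alt needs_dict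
instance (needs_dict : List (String × List (String × List Int))) (out : List (String × List (String × Option Int))) : Decidable (Spec_needs_to_open_hours needs_dict out) := by unfold Spec_needs_to_open_hours; infer_instance

-- ===== CLAIM (what is proved, stated in full; the proofs are below) =====
def Claim_equal_needs_to_open_hours : Prop := ∀ (needs_dict : List (String × List (String × List Int))), Dom_needs_to_open_hours needs_dict → Pre_needs_to_open_hours needs_dict → Spec_needs_to_open_hours needs_dict (needs_to_open_hours needs_dict)

-- ===== LEMMAS AND PROOFS =====

-- a prefix of zeros shifts the first-nonzero index by its length
theorem findIdx?_zero_prefix (pre t : List Int) (hpre : ∀ x ∈ pre, x = 0) :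
    (pre ++ t).findIdx? (fun x => x != 0) = (t.findIdx? (fun x => x != 0)).map (fun k => k + pre.length) := by
  have h0 : pre.findIdx? (fun x => x != 0) = none :=
    List.findIdx?_eq_none_iff.2 (by intro x hx; simp [hpre x hx])
  simp [List.findIdx?_append, h0]

theorem index?_zero_prefix (pre : List Int) (x : Int) (t : List Int) (hx : x ≠ 0)
    (hpre : ∀ y ∈ pre, y = 0) :
    PySem.List.index? (pre ++ x :: t) x = some pre.length := by
  induction pre with
  | nil => simpa using PySem.List.index?_cons_self (xs := t) (x := x)
  | cons a pre ih =>
    have ha : a = 0 := hpre a (by simp)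
    rw [List.cons_append, PySem.List.index?_cons_of_ne _ (by omega : a ≠ x),
        ih (fun y hy => hpre y (by simp [hy]))]
    simp

theorem firstGo_spec (pre t : List Int) (hpre : ∀ x ∈ pre, x = 0) :
    firstGo (pre ++ t) t
      = ((pre ++ t).findIdx? (fun x => x != 0)).map (fun k => (k : Int)) := by
  induction t generalizing pre with
  | nil =>
    rw [firstGo, List.findIdx?_eq_none_iff.2 (by intro x hx; simp [hpre x (by simpa using hx)])]
    rfl
  | cons x xs ih =>
    rw [firstGo]
    by_cases hx : x = 0
    · subst hx
      rw [if_neg (fun h => h rfl)]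
      have := ih (pre ++ [(0 : Int)]) (by intro y hy; rcases List.mem_append.1 hy with h | h
                                          · exact hpre y h
                                          · simpa using h)
      simpa [List.append_assoc] using this
    · rw [if_pos hx, index?_zero_prefix pre x xs hx hpre,
          findIdx?_zero_prefix pre (x :: xs) hpre]
      simp [List.findIdx?_cons, hx]

theorem lastGo_spec (l pre t : List Int) (hrev : l.reverse = pre ++ t)
    (hpre : ∀ x ∈ pre, x = 0) :
    lastGo l t
      = (l.reverse.findIdx? (fun x => x != 0)).map (fun k => (l.length : Int) - 1 - (k : Int)) := by
  induction t generalizing pre with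
  | nil =>
    rw [lastGo, hrev, List.append_nil,
        List.findIdx?_eq_none_iff.2 (by intro x hx; simp [hpre x hx])]
    rfl
  | cons x xs ih =>
    rw [lastGo]
    by_cases hx : x = 0
    · subst hx
      rw [if_neg (fun h => h rfl)]
      exact ih (pre ++ [(0 : Int)]) (by simpa [List.append_assoc] using hrev)
        (by intro y hy; rcases List.mem_append.1 hy with h | h
            · exact hpre y h
            · simpa using h)
    · rw [if_pos hx, PySem.List.slice?_none_none_neg_one]
      simp only [Option.getD_some]
      rw [hrev, index?_zero_prefix pre x xs hx hpre,
          findIdx?_zero_prefix pre (x :: xs) hpre]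
      simp [List.findIdx?_cons, hx]

theorem head_gen (t : List Int) (s : Int) :
    (((PySem.List.enumerate t s).filter (fun p => p.2 != 0)).map (·.1)).head?
      = (t.findIdx? (fun x => x != 0)).map (fun k => s + (k : Int)) := by
  induction t generalizing s with
  | nil => simp [PySem.List.enumerate_nil]
  | cons x xs ih =>
    rw [PySem.List.enumerate_cons, List.findIdx?_cons]
    by_cases hx : x = 0
    · subst hx
      rw [if_neg (by simp), List.filter_cons_of_neg (by simp), ih (s + 1)]
      cases xs.findIdx? (fun x => x != 0) <;> simp; ring
    · rw [if_pos (by simpa using hx), List.filter_cons_of_pos (by simpa using hx)]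
      simp

theorem last_gen (t : List Int) :
    (nonzero_indices t).getLast?
      = (t.reverse.findIdx? (fun x => x != 0)).map (fun k => (t.length : Int) - 1 - (k : Int)) := by
  induction t using List.reverseRecOn with
  | nil => simp [nonzero_indices, PySem.List.enumerate_nil]
  | append_singleton ys x ih =>
    rw [nonzero_indices, PySem.List.enumerate_append, List.filter_append, List.map_append,
        List.reverse_append]
    simp only [List.reverse_singleton, List.singleton_append, List.findIdx?_cons]
    by_cases hx : x = 0
    · subst hx
      rw [if_neg (by simp)]
      have hnil : ((PySem.List.enumerate [(0:Int)] (0 + ys.length)).filter (fun p => p.2 != 0)) = [] := by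
        simp [PySem.List.enumerate_cons, PySem.List.enumerate_nil]
      rw [hnil, List.map_nil, List.append_nil, ← nonzero_indices.eq_def, ih]
      cases ys.reverse.findIdx? (fun x => x != 0) <;> simp; ring
    · rw [if_pos (by simpa using hx)]
      have hone : (((PySem.List.enumerate [x] ((0:Int) + ys.length)).filter (fun p => p.2 != 0)).map (·.1))
          = [((ys.length : Int))] := by
        simp [PySem.List.enumerate_cons, PySem.List.enumerate_nil, hx]
      rw [hone, List.getLast?_append]
      simp

theorem first_eq_head (l : List Int) :
    first_not_zero_index l = (nonzero_indices l).head? := by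
  have hA := firstGo_spec [] l (by simp)
  rw [first_not_zero_index, nonzero_indices]
  simp only [List.nil_append] at hA
  rw [hA, head_gen l 0]
  cases l.findIdx? (fun x => x != 0) <;> simp

theorem last_eq_getLast (l : List Int) :
    last_not_zero_index l = (nonzero_indices l).getLast? := by
  rw [last_not_zero_index, PySem.List.slice?_none_none_neg_one, Option.getD_some,
      lastGo_spec l [] l.reverse rfl (by simp), last_gen]

-- ===== VERDICT (by name: the statement is the Claim_ definition above) =====
theorem needs_to_open_hours_spec : Claim_equal_needs_to_open_hours := by
  intro needs_dict _ _
  unfold Spec_needs_to_open_hours needs_to_open_hours needs_to_open_hours_alt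
  have hfun : (fun (d : PySem.Dict String (PySem.Dict String (Option Int))) (p : String × List Int) =>
      let first_hour := first_not_zero_index p.2
      let last_hour := last_not_zero_index p.2
      match d.get? p.1 with
      | some inner => d.insert p.1 ((inner.insert "first" first_hour).insert "last" last_hour)
      | none => d)
    = (fun (d : PySem.Dict String (PySem.Dict String (Option Int))) (p : String × List Int) =>
      let nz := nonzero_indices p.2
      match d.get? p.1 with
      | some inner => d.insert p.1 ((inner.insert "first" nz.head?).insert "last" nz.getLast?)
      | none => d) := by
    funext d p
    simp only [first_eq_head, last_eq_getLast]
  rw [hfun]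
  rfl
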